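-- pv_equiv track=rewrite | github.com/jak010/study-algorithm-src | Programmers/Level0/240501_왼쪽오른쪽.py | solution
-- ===== SOURCE A (Python) =====
-- def solution(str_list):
--     answer = []
--     for idx, value in enumerate(str_list):
--
--         if value == 'l':
--             answer = str_list[:idx]
--             break
--
--         if value == 'r':
--             answer = str_list[idx+1:]
--             break
--     return answer
-- ===== SOURCE B (Python) =====
-- def solution(str_list):
--     try:
--         li = str_list.index('l')
--     except ValueError:
--         li = None
--     try:
--         ri = str_list.index('r')
--     except ValueError:
--         ri = None
--     if li is not None and (ri is None or li < ri):
--         return str_list[:li]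
--     if ri is not None:
--         return str_list[ri + 1:]
--     return []
-- ===== Notes on version B (the rewrite author's own statement) =====
-- stated objective: alternative
-- what changed: Replaces the single short-circuiting enumerate loop with two independent first-occurrence index lookups ('l' and 'r') computed up front, then a comparison of the two positions to pick the slice.
import Mathlib
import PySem

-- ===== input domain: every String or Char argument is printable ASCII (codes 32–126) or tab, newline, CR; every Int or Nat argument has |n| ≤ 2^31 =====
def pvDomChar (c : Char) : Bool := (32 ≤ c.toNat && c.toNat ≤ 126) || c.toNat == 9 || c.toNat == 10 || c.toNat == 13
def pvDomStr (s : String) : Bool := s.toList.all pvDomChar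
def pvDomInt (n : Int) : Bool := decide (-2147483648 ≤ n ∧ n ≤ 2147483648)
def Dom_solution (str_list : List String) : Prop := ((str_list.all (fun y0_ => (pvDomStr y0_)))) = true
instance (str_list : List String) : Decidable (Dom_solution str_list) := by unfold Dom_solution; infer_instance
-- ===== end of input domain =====

-- B replaces A's single short-circuiting scan with two up-front first-occurrence
-- lookups ('l' and 'r') chosen by index comparison; objective: alternative decomposition.

-- ===== PORT A =====
-- the for/break loop over enumerate(str_list)
def solutionLoop (str_list : List String) : List (Int × String) → List String
  | [] => []
  | (idx, value) :: rest =>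
    if value = "l" then PySem.List.slice str_list none (some idx)
    else if value = "r" then PySem.List.slice str_list (some (idx + 1)) none
    else solutionLoop str_list rest

def solution (str_list : List String) : List String :=
  solutionLoop str_list (PySem.List.enumerate str_list 0)

-- ===== PORT B =====
def solution_alt (str_list : List String) : List String :=
  let li := PySem.List.index? str_list "l"
  let ri := PySem.List.index? str_list "r"
  match li, ri with
  | some l, some r => if l < r then str_list.take l else str_list.drop (r + 1)
  | some l, none   => str_list.take l
  | none,   some r => str_list.drop (r + 1)
  | none,   none   => []

-- ===== PRECONDITION & SPEC =====
def Spec_solution (str_list : List String) (out : List String) : Prop := out = solution_alt str_list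
instance (str_list : List String) (out : List String) : Decidable (Spec_solution str_list out) := by unfold Spec_solution; infer_instance

-- ===== CLAIM (what is proved, stated in full; the proofs are below) =====
def Claim_equal_solution : Prop := ∀ (str_list : List String), Dom_solution str_list → Spec_solution str_list (solution str_list)

-- ===== LEMMAS AND PROOFS =====

-- characterisation of the loop: it finds the first 'l'/'r' token in t and slices full
lemma solutionLoop_char (full : List String) (t : List String) : ∀ (s : Nat),
    solutionLoop full (PySem.List.enumerate t (s : Int)) =
      match PySem.List.index? t "l", PySem.List.index? t "r" with
      | some l, some r => if l < r then full.take (s + l) else full.drop (s + r + 1)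
      | some l, none   => full.take (s + l)
      | none,   some r => full.drop (s + r + 1)
      | none,   none   => [] := by
  induction t with
  | nil => intro s; simp [solutionLoop, PySem.List.enumerate_nil]
  | cons v rest ih =>
    intro s
    rw [PySem.List.enumerate_cons]
    by_cases hl : v = "l"
    · subst hl
      simp only [solutionLoop]
      rw [PySem.List.slice_to_natCast]
      rw [PySem.List.index?_cons_self, PySem.List.index?_cons_of_ne _ (by decide)]
      cases PySem.List.index? rest "r" with
      | none => simp
      | some r => simp
    · by_cases hrv : v = "r"
      · subst hrv
        simp only [solutionLoop, if_neg (by decide : ¬ ("r" : String) = "l")]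
        have : ((s : Int) + 1) = ((s + 1 : Nat) : Int) := by push_cast; ring
        rw [this, PySem.List.slice_from_natCast]
        rw [PySem.List.index?_cons_self, PySem.List.index?_cons_of_ne _ (by decide)]
        cases PySem.List.index? rest "l" with
        | none => simp
        | some l => simp
      · simp only [solutionLoop, if_neg hl, if_neg hrv]
        have : ((s : Int) + 1) = ((s + 1 : Nat) : Int) := by push_cast; ring
        rw [this, ih (s + 1)]
        rw [PySem.List.index?_cons_of_ne _ hl, PySem.List.index?_cons_of_ne _ hrv]
        cases PySem.List.index? rest "l" with
        | none =>
          cases PySem.List.index? rest "r" with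
          | none => simp
          | some r => simp; ring_nf
        | some l =>
          cases PySem.List.index? rest "r" with
          | none => simp; ring_nf
          | some r =>
            simp only [Option.map_some]
            have hcmp : (l + 1 < r + 1) = (l < r) := by simp
            by_cases h : l < r <;>
              simp [h, Nat.add_comm, Nat.add_left_comm]

-- ===== VERDICT (by name: the statement is the Claim_ definition above) =====
theorem solution_spec : Claim_equal_solution := by
  intro str_list _
  unfold Spec_solution solution solution_alt
  have h := solutionLoop_char str_list str_list 0
  simp only [Nat.cast_zero] at h
  rw [h]
  cases PySem.List.index? str_list "l" with
  | none => cases PySem.List.index? str_list "r" with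
    | none => rfl
    | some r => simp
  | some l => cases PySem.List.index? str_list "r" with
    | none => simp
    | some r => simp
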